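-- pv_equiv track=rewrite | github.com/Rohit91singh9/Coding-DP-DSA | findMaximumSum.py | cumulative_observable_sum
-- ===== SOURCE A (Python) =====
-- def cumulative_observable_sum(stock,k):
--     sum,m,x=0,0,1
--     #loop
--     for i in range(len(stock)-k+1):
--         #taking sublist having length k
--         a=stock[i:i+k]
--         x=1
--         sum=0
--         #finding whether duplicates are there or not
--         for j in a:
--             #find count
--             if(a.count(j)>1):
--                 x=0
--                 break
--             #cumulative sum
--             else:
--                 sum+=j
--         #maximum sum
--         if(x==1 and m<sum):
--              m=sum
--     if(m==0):
--         return -1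
--     else:
--         return m
-- ===== SOURCE B (Python) =====
-- def cumulative_observable_sum(stock, k):
--     n = len(stock)
--     if k < 1 or k > n:
--         return -1
--     counts = {}
--     s = 0
--     best = 0
--     for i in range(n):
--         v = stock[i]
--         counts[v] = counts.get(v, 0) + 1
--         s += v
--         if i >= k:
--             u = stock[i - k]
--             if counts[u] == 1:
--                 del counts[u]
--             else:
--                 counts[u] = counts[u] - 1
--             s -= u
--         if len(counts) == k and s > best:
--             best = s
--     return best if best > 0 else -1
-- ===== Notes on version B (the rewrite author's own statement) =====
-- stated objective: faster
-- what changed: Replaced the per-start O(k^2) rescan (slice each window, then a.count(j) for every element) by a single O(n) sliding-window pass that maintains a count dict and a running sum, checking distinctness via len(counts) == k.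
-- outside the precondition, e.g. on cumulative_observable_sum([1, 2, 3], -1): A returns 3, B returns -1
import Mathlib
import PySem

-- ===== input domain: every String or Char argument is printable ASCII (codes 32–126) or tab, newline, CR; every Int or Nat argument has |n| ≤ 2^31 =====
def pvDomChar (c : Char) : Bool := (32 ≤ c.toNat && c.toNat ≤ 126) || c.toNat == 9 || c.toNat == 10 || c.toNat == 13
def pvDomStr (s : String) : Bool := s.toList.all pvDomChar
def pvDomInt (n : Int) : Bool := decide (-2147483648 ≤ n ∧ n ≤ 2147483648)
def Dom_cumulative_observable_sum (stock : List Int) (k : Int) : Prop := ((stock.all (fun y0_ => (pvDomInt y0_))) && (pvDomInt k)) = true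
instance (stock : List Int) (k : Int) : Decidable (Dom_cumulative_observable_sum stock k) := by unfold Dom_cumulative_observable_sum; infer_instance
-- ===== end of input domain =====

-- B replaces A's per-start O(k^2) window rescan by one sliding-window pass with a count
-- dict and a running sum (objective: faster; a timing run measures the speed-up).


-- ===== PORT A =====
-- inner 'for j in a' loop: x starts 1; on a.count(j) > 1 break with x = 0, else sum += j
def pvInnerA (a : List Int) : List Int → Int → Int × Int
  | [], s => (1, s)
  | j :: rest, s => if 1 < PySem.List.count a j then (0, s) else pvInnerA a rest (s + j)

def cumulative_observable_sum (stock : List Int) (k : Int) : Int :=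
  let m := (PySem.List.pyRange 0 ((stock.length : Int) - k + 1) 1).foldl
    (fun m i =>
      let a := PySem.List.slice stock (some i) (some (i + k))
      let xs := pvInnerA a a 0
      if xs.1 = 1 ∧ m < xs.2 then xs.2 else m) 0
  if m = 0 then -1 else m

-- ===== PORT B =====
-- one step of the sliding window: add stock[i]; once i ≥ k drop stock[i-k]; record best.
-- (stock[i] / stock[i-k] are ported with pyGetD default 0: both indices are always in range.)
def pvStepB (stock : List Int) (k : Int) (st : PySem.Dict Int Int × Int × Int) (i : Int) :
    PySem.Dict Int Int × Int × Int :=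
  let v := PySem.List.pyGetD stock i 0
  let counts := st.1.insert v (st.1.getD v 0 + 1)
  let s := st.2.1 + v
  let cs : PySem.Dict Int Int × Int :=
    if k ≤ i then
      let u := PySem.List.pyGetD stock (i - k) 0
      let c := counts.getD u 0
      ((if c = 1 then counts.erase u else counts.insert u (c - 1)), s - u)
    else (counts, s)
  let best := if (cs.1.size : Int) = k ∧ st.2.2 < cs.2 then cs.2 else st.2.2
  (cs.1, cs.2, best)

def cumulative_observable_sum_alt (stock : List Int) (k : Int) : Int :=
  let n := (stock.length : Int)
  if k < 1 ∨ n < k then -1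
  else
    let st := (PySem.List.pyRange 0 n 1).foldl (pvStepB stock k) (PySem.Dict.mk [], 0, 0)
    if 0 < st.2.2 then st.2.2 else -1

-- ===== PRECONDITION & SPEC =====
-- Pre_ restricts to the task's natural domain k ≥ 0: a negative window size is outside the
-- task's domain, and there A's windows stock[i:i+k] come from Python's negative-end slicing
-- while B simply returns -1.
def Pre_cumulative_observable_sum (stock : List Int) (k : Int) : Prop := 0 ≤ k
instance (stock : List Int) (k : Int) : Decidable (Pre_cumulative_observable_sum stock k) := by unfold Pre_cumulative_observable_sum; infer_instance
def pvWitness_cumulative_observable_sum : List Int × Int := ([1, 2, 3, 1], 2)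

def Spec_cumulative_observable_sum (stock : List Int) (k : Int) (out : Int) : Prop := out = cumulative_observable_sum_alt stock k
instance (stock : List Int) (k : Int) (out : Int) : Decidable (Spec_cumulative_observable_sum stock k out) := by unfold Spec_cumulative_observable_sum; infer_instance

-- ===== CLAIM (what is proved, stated in full; the proofs are below) =====
def Claim_equal_cumulative_observable_sum : Prop := ∀ (stock : List Int) (k : Int), Dom_cumulative_observable_sum stock k → Pre_cumulative_observable_sum stock k → Spec_cumulative_observable_sum stock k (cumulative_observable_sum stock k)

-- ===== LEMMAS AND PROOFS =====

-- the window of length k' starting at j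
def pvWin (stock : List Int) (k' j : Nat) : List Int := (stock.drop j).take k'

-- the common specification step: take the window sum when the window is duplicate-free
def pvF (stock : List Int) (k' : Nat) (m : Int) (j : Nat) : Int :=
  if (pvWin stock k' j).Nodup ∧ m < (pvWin stock k' j).sum then (pvWin stock k' j).sum else m

-- count-dict invariant: d holds exactly the multiset of the window w
def pvDInv (w : List Int) (d : PySem.Dict Int Int) : Prop :=
  d.keys.Nodup ∧ ∀ v : Int, d.get? v = if w.count v = 0 then none else some ((w.count v : Nat) : Int)

theorem pvInnerA_ok (a : List Int) : ∀ (rest : List Int) (s : Int),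
    (∀ j ∈ rest, List.count j a ≤ 1) → pvInnerA a rest s = (1, s + rest.sum) := by
  intro rest
  induction rest with
  | nil => intro s _; simp [pvInnerA]
  | cons j rest ih =>
    intro s h
    have hj := h j (by simp)
    rw [pvInnerA, if_neg (by rw [PySem.List.count_eq]; omega), ih _ (fun x hx => h x (by simp [hx]))]
    simp; ring

theorem pvInnerA_dup (a : List Int) : ∀ (rest : List Int) (s : Int),
    (∃ j ∈ rest, 1 < List.count j a) → (pvInnerA a rest s).1 = 0 := by
  intro rest
  induction rest with
  | nil => intro s h; simp at h
  | cons j rest ih =>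
    intro s h
    rw [pvInnerA]
    by_cases hc : 1 < PySem.List.count a j
    · rw [if_pos hc]
    · rw [if_neg hc]
      apply ih
      rcases h with ⟨x, hx, hcnt⟩
      rcases List.mem_cons.mp hx with rfl | hx
      · exact absurd hcnt (by rw [PySem.List.count_eq] at hc; omega)
      · exact ⟨x, hx, hcnt⟩

theorem pvA_eq (stock : List Int) (k : Int) (hk : 0 ≤ k) :
    cumulative_observable_sum stock k =
      (let m := (List.range ((stock.length : Int) - k + 1).toNat).foldl (pvF stock k.toNat) 0
       if m = 0 then -1 else m) := by
  have hfold : (PySem.List.pyRange 0 ((stock.length : Int) - k + 1) 1).foldl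
      (fun m i =>
        let a := PySem.List.slice stock (some i) (some (i + k))
        let xs := pvInnerA a a 0
        if xs.1 = 1 ∧ m < xs.2 then xs.2 else m) 0
      = (List.range ((stock.length : Int) - k + 1).toNat).foldl (pvF stock k.toNat) 0 := by
    rw [PySem.List.pyRange_one, List.foldl_map,
        show (stock.length : Int) - k + 1 - 0 = (stock.length : Int) - k + 1 by ring]
    apply PySem.List.foldl_congr_mem
    intro acc j hj
    simp only [zero_add]
    have hsl : PySem.List.slice stock (some (j : Int)) (some ((j : Int) + k)) = pvWin stock k.toNat j := by
      have h2 : (j : Int) + k = ((j + k.toNat : Nat) : Int) := by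
        push_cast [Int.toNat_of_nonneg hk]; ring
      rw [h2, PySem.List.slice_natCast]
      unfold pvWin
      congr 1
      omega
    rw [hsl]
    by_cases hnd : (pvWin stock k.toNat j).Nodup
    · rw [pvInnerA_ok _ _ _ (fun x _ => List.nodup_iff_count_le_one.mp hnd x)]
      unfold pvF
      simp [hnd]
    · have hx : ∃ x ∈ pvWin stock k.toNat j, 1 < List.count x (pvWin stock k.toNat j) := by
        rw [List.nodup_iff_count_le_one] at hnd
        push Not at hnd
        obtain ⟨x, hx⟩ := hnd
        exact ⟨x, List.count_pos_iff.mp (by omega), by omega⟩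
      have h0 := pvInnerA_dup _ _ 0 hx
      unfold pvF
      rw [if_neg (by rw [h0]; simp), if_neg (by simp [hnd])]
  unfold cumulative_observable_sum
  simp only []
  rw [hfold]

theorem pvFind?_filter_ne (u x : Int) (hx : x ≠ u) : ∀ (l : List (Int × Int)),
    (l.filter (fun p => !(p.1 == u))).find? (fun p => p.1 == x) = l.find? (fun p => p.1 == x) := by
  intro l
  induction l with
  | nil => rfl
  | cons p l ih =>
    by_cases hu : p.1 = u
    · rw [List.filter_cons_of_neg (by simp [hu]), List.find?_cons_of_neg (by simp [hu, hx.symm]), ih]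
    · rw [List.filter_cons_of_pos (by simp [hu])]
      by_cases hpx : p.1 = x
      · rw [List.find?_cons_of_pos (by simp [hpx]), List.find?_cons_of_pos (by simp [hpx])]
      · rw [List.find?_cons_of_neg (by simp [hpx]), List.find?_cons_of_neg (by simp [hpx]), ih]

theorem pvGet?_erase (d : PySem.Dict Int Int) (u x : Int) :
    (d.erase u).get? x = if x = u then none else d.get? x := by
  by_cases hx : x = u
  · subst hx
    rw [if_pos rfl]
    simp only [PySem.Dict.erase, PySem.Dict.get?]
    rw [List.find?_eq_none.mpr]
    · rfl
    · intro p hp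
      have := List.of_mem_filter hp
      simpa using this
  · rw [if_neg hx]
    simp only [PySem.Dict.erase, PySem.Dict.get?]
    rw [pvFind?_filter_ne u x hx]

theorem pvNodup_keys_erase (d : PySem.Dict Int Int) (u : Int) (h : d.keys.Nodup) :
    (d.erase u).keys.Nodup := by
  have hs : (d.erase u).keys.Sublist d.keys := by
    simp only [PySem.Dict.erase, PySem.Dict.keys]
    exact List.Sublist.map _ List.filter_sublist
  exact h.sublist hs

theorem pvDInv_insert (w : List Int) (d : PySem.Dict Int Int) (h : pvDInv w d) (v : Int) :
    pvDInv (w ++ [v]) (d.insert v (d.getD v 0 + 1)) := by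
  obtain ⟨hnd, hget⟩ := h
  have hgetD : d.getD v 0 = ((w.count v : Nat) : Int) := by
    rw [PySem.Dict.getD_eq_get?_getD, hget v]
    split_ifs with h0
    · simp [h0]
    · simp
  refine ⟨PySem.Dict.nodup_keys_insert _ _ _ hnd, ?_⟩
  intro x
  rw [PySem.Dict.get?_insert]
  by_cases hx : x = v
  · subst hx
    rw [if_pos rfl, hgetD]
    have hc : (w ++ [x]).count x = w.count x + 1 := by simp
    rw [hc, if_neg (by omega)]
    push_cast; ring_nf
  · rw [if_neg hx, hget x]
    have hc : (w ++ [v]).count x = w.count x := by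
      rw [List.count_append, List.count_singleton]
      simp [Ne.symm hx]
    rw [hc]

theorem pvDInv_remove (u : Int) (t : List Int) (d : PySem.Dict Int Int) (h : pvDInv (u :: t) d) :
    pvDInv t (if d.getD u 0 = 1 then d.erase u else d.insert u (d.getD u 0 - 1)) := by
  obtain ⟨hnd, hget⟩ := h
  have hcu : (u :: t).count u = t.count u + 1 := by simp
  have hgetD : d.getD u 0 = ((t.count u : Nat) : Int) + 1 := by
    rw [PySem.Dict.getD_eq_get?_getD, hget u, hcu, if_neg (by omega)]
    push_cast; simp
  by_cases h1 : d.getD u 0 = 1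
  · rw [if_pos h1]
    have ht0 : t.count u = 0 := by
      rw [hgetD] at h1; exact_mod_cast by omega
    refine ⟨pvNodup_keys_erase d u hnd, ?_⟩
    intro x
    rw [pvGet?_erase]
    by_cases hx : x = u
    · subst hx; rw [if_pos rfl, if_pos ht0]
    · rw [if_neg hx, hget x]
      have : (u :: t).count x = t.count x := by
        rw [List.count_cons]; simp [Ne.symm hx]
      rw [this]
  · rw [if_neg h1]
    have ht0 : t.count u ≠ 0 := by
      intro h0; rw [hgetD, h0] at h1; simp at h1
    refine ⟨PySem.Dict.nodup_keys_insert _ _ _ hnd, ?_⟩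
    intro x
    rw [PySem.Dict.get?_insert]
    by_cases hx : x = u
    · subst hx
      rw [if_pos rfl, if_neg ht0, hgetD]
      simp
    · rw [if_neg hx, hget x]
      have : (u :: t).count x = t.count x := by
        rw [List.count_cons]; simp [Ne.symm hx]
      rw [this]

theorem pvDInv_size (w : List Int) (d : PySem.Dict Int Int) (h : pvDInv w d) :
    d.size = w.dedup.length := by
  obtain ⟨hnd, hget⟩ := h
  have hmem : ∀ v : Int, v ∈ d.keys ↔ v ∈ w.dedup := by
    intro v
    have hiff := PySem.Dict.get?_eq_none_iff_not_mem_keys (d := d) (k := v)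
    rw [hget v] at hiff
    by_cases h0 : w.count v = 0
    · rw [if_pos h0] at hiff
      simp only [List.mem_dedup]
      constructor
      · intro hv; exact absurd hv (hiff.mp rfl)
      · intro hv; exact absurd (List.count_pos_iff.mpr hv) (by omega)
    · rw [if_neg h0] at hiff
      have hk : v ∈ d.keys := by
        by_contra hnk
        exact absurd (hiff.mpr hnk) (by simp)
      have hw : v ∈ w := List.count_pos_iff.mp (by omega)
      simp [hk, List.mem_dedup, hw]
  have : d.keys.Perm w.dedup := (List.perm_ext_iff_of_nodup hnd (List.nodup_dedup w)).mpr hmem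
  have hlen := this.length_eq
  simpa [PySem.Dict.keys, PySem.Dict.size] using hlen

theorem pvDedup_len (w : List Int) (k' : Nat) (hw : w.length = k') :
    (w.dedup.length = k' ↔ w.Nodup) := by
  constructor
  · intro h
    have := (List.dedup_sublist w).eq_of_length (by omega)
    rw [← this]; exact List.nodup_dedup w
  · intro h; rw [List.Nodup.dedup h, hw]

theorem pvB_inv (stock : List Int) (k : Int) (hk1 : 1 ≤ k) (hkn : k ≤ (stock.length : Int)) :
    ∀ t : Nat, t ≤ stock.length →
     ∃ d, (PySem.List.pyRange 0 (t : Int) 1).foldl (pvStepB stock k) (PySem.Dict.mk [], 0, 0)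
        = (d, ((stock.drop (t - min t k.toNat)).take (min t k.toNat)).sum,
              (List.range (t + 1 - k.toNat)).foldl (pvF stock k.toNat) 0)
      ∧ pvDInv ((stock.drop (t - min t k.toNat)).take (min t k.toNat)) d := by
  have hk1' : 1 ≤ k.toNat := by omega
  have hkk : k = (k.toNat : Int) := by omega
  have hkn' : k.toNat ≤ stock.length := by omega
  intro t
  induction t with
  | zero =>
    intro _
    refine ⟨PySem.Dict.mk [], ?_, ?_⟩
    · rw [Nat.cast_zero, PySem.List.pyRange_one_eq_nil (le_refl 0)]
      rw [show 0 + 1 - k.toNat = 0 by omega]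
      simp
    · refine ⟨by simp [PySem.Dict.keys], ?_⟩
      intro v
      simp [PySem.Dict.get?]
  | succ t ih =>
    intro ht1
    have htn : t < stock.length := ht1
    obtain ⟨d, hfold, hinv⟩ := ih (by omega)
    have hstep : (PySem.List.pyRange 0 ((t + 1 : Nat) : Int) 1) = (PySem.List.pyRange 0 ((t : Nat) : Int) 1) ++ [((t : Nat) : Int)] := by
      push_cast
      exact PySem.List.pyRange_one_succ_right (by positivity)
    rw [hstep, List.foldl_append, hfold, List.foldl_cons, List.foldl_nil]
    have hv : PySem.List.pyGetD stock ((t : Nat) : Int) 0 = stock[t] := by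
      rw [PySem.List.pyGetD_natCast, List.getD_eq_getElem _ _ htn]
    by_cases hc : k.toNat ≤ t
    · -- full window slides: drop stock[t - k]
      have hki : k ≤ ((t : Nat) : Int) := by omega
      have hmin : min t k.toNat = k.toNat := Nat.min_eq_right hc
      have hmin1 : min (t + 1) k.toNat = k.toNat := Nat.min_eq_right (by omega)
      have hlt1 : t - k.toNat < stock.length := by omega
      have hu : PySem.List.pyGetD stock (((t : Nat) : Int) - k) 0 = stock[t - k.toNat]'hlt1 := by
        rw [show ((t : Nat) : Int) - k = ((t - k.toNat : Nat) : Int) by omega]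
        rw [PySem.List.pyGetD_natCast, List.getD_eq_getElem _ _ hlt1]
      have htake : ∀ (x : Int) (l : List Int), List.take k.toNat (x :: l) = x :: List.take (k.toNat - 1) l := by
        intro x l
        conv_lhs => rw [show k.toNat = (k.toNat - 1) + 1 by omega]
        rw [List.take_succ_cons]
      have hwt : (stock.drop (t - min t k.toNat)).take (min t k.toNat)
               = stock[t - k.toNat]'hlt1 :: ((stock.drop (t - k.toNat + 1)).take (k.toNat - 1)) := by
        rw [hmin, List.drop_eq_getElem_cons hlt1, htake]
      have hwt1 : (stock.drop (t + 1 - min (t + 1) k.toNat)).take (min (t + 1) k.toNat)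
                = ((stock.drop (t - k.toNat + 1)).take (k.toNat - 1)) ++ [stock[t]] := by
        rw [hmin1, show t + 1 - k.toNat = t - k.toNat + 1 by omega]
        rw [show List.take k.toNat (stock.drop (t - k.toNat + 1))
              = List.take ((k.toNat - 1) + 1) (stock.drop (t - k.toNat + 1)) by rw [Nat.sub_add_cancel hk1']]
        rw [List.take_add_one, List.getElem?_eq_getElem (by rw [List.length_drop]; omega)]
        congr 1
        rw [List.getElem_drop]
        exact congrArg (fun z => [z]) (getElem_congr rfl (by omega) (by omega))
      have hins := pvDInv_insert _ d hinv (stock[t])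
      rw [hwt, List.cons_append] at hins
      have hrem := pvDInv_remove _ _ _ hins
      have hw' : ((stock.drop (t - k.toNat + 1)).take (k.toNat - 1)) ++ [stock[t]]
               = (stock.drop (t + 1 - min (t + 1) k.toNat)).take (min (t + 1) k.toNat) := hwt1.symm
      have hlenw' : (((stock.drop (t - k.toNat + 1)).take (k.toNat - 1)) ++ [stock[t]]).length = k.toNat := by
        rw [List.length_append, List.length_take, List.length_drop]
        simp
        omega
      have hrange : List.range (t + 1 + 1 - k.toNat) = List.range (t + 1 - k.toNat) ++ [t + 1 - k.toNat] := by
        rw [show t + 1 + 1 - k.toNat = (t + 1 - k.toNat) + 1 by omega, List.range_succ]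
      simp only [pvStepB, hv, hu, if_pos hki]
      apply Exists.intro
      refine ⟨Prod.ext rfl (Prod.ext ?_ ?_), ?_⟩
      · -- sum component
        dsimp only
        rw [hwt, hwt1, List.sum_cons, List.sum_append]
        simp
        ring
      · -- best component
        dsimp only
        rw [hrange, List.foldl_append, List.foldl_cons, List.foldl_nil]
        have hwin : pvWin stock k.toNat (t + 1 - k.toNat)
                  = ((stock.drop (t - k.toNat + 1)).take (k.toNat - 1)) ++ [stock[t]] := by
          rw [← hwt1, hmin1]
          rfl
        unfold pvF
        rw [hwin]
        apply if_congr _ _ rfl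
        · constructor
          · rintro ⟨hsz, hlt⟩
            refine ⟨?_, ?_⟩
            · have := pvDInv_size _ _ hrem
              rw [← pvDedup_len _ _ hlenw']
              omega
            · rw [hwt] at hlt
              rw [List.sum_append, List.sum_cons] at *
              simp at hlt ⊢
              omega
          · rintro ⟨hnd, hlt⟩
            refine ⟨?_, ?_⟩
            · have := pvDInv_size _ _ hrem
              rw [← pvDedup_len _ _ hlenw'] at hnd
              omega
            · rw [hwt, List.sum_cons]
              rw [List.sum_append] at hlt
              simp at hlt ⊢
              omega
        · rw [hwt, List.sum_cons, List.sum_append]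
          simp
          ring
      · rw [← hw']
        exact hrem
    · -- window still growing: no element dropped
      have hki : ¬ k ≤ ((t : Nat) : Int) := by omega
      have hmin : min t k.toNat = t := Nat.min_eq_left (by omega)
      have hmin1 : min (t + 1) k.toNat = t + 1 := Nat.min_eq_left (by omega)
      have hwt : (stock.drop (t - min t k.toNat)).take (min t k.toNat) = stock.take t := by
        rw [hmin]
        simp
      have htk : stock.take (t + 1) = stock.take t ++ [stock[t]] := by
        rw [List.take_add_one, List.getElem?_eq_getElem htn]
        rfl
      have hwt1 : (stock.drop (t + 1 - min (t + 1) k.toNat)).take (min (t + 1) k.toNat) = stock.take (t + 1) := by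
        rw [hmin1]
        simp
      have hins := pvDInv_insert _ d hinv (stock[t])
      rw [hwt] at hins
      have hlen1 : (stock.take (t + 1)).length = t + 1 := by
        rw [List.length_take]
        omega
      simp only [pvStepB, hv, if_neg hki]
      apply Exists.intro
      refine ⟨Prod.ext rfl (Prod.ext ?_ ?_), ?_⟩
      · dsimp only
        rw [hwt, hwt1, htk, List.sum_append]
        simp
      · dsimp only
        by_cases hfull : t + 1 = k.toNat
        · -- first complete window
          have hr0 : t + 1 - k.toNat = 0 := by omega
          have hr1 : t + 1 + 1 - k.toNat = 1 := by omega
          rw [hr0, hr1]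
          simp only [List.range_one, List.range_zero, List.foldl_cons, List.foldl_nil]
          have hwin : pvWin stock k.toNat 0 = stock.take (t + 1) := by
            unfold pvWin
            rw [List.drop_zero, ← hfull]
          unfold pvF
          rw [hwin]
          apply if_congr _ _ rfl
          · constructor
            · rintro ⟨hsz, hlt⟩
              refine ⟨?_, by rw [htk, List.sum_append]; rw [hwt] at hlt; simpa using hlt⟩
              have := pvDInv_size _ _ hins
              rw [← htk] at this
              rw [← pvDedup_len _ _ (by omega)]
              omega
            · rintro ⟨hnd, hlt⟩
              refine ⟨?_, by rw [htk, List.sum_append] at hlt; rw [hwt]; simpa using hlt⟩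
              have := pvDInv_size _ _ hins
              rw [← htk] at this
              rw [← pvDedup_len _ _ (by omega)] at hnd
              omega
          · rw [hwt, htk, List.sum_append]
            simp
        · -- window not yet complete: size < k
          have hr0 : t + 1 - k.toNat = 0 := by omega
          have hr1 : t + 1 + 1 - k.toNat = 0 := by omega
          rw [hr0, hr1]
          have hsz := pvDInv_size _ _ hins
          rw [← htk] at hsz
          have hded : (stock.take (t + 1)).dedup.length ≤ t + 1 := by
            have := (List.dedup_sublist (stock.take (t + 1))).length_le
            omega
          rw [if_neg]
          rintro ⟨h1, _⟩
          omega
      · rw [hwt1, htk]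
        exact hins

theorem pvFold_nonneg (stock : List Int) (k' : Nat) : ∀ (l : List Nat) (m : Int), 0 ≤ m →
    0 ≤ l.foldl (pvF stock k') m := by
  intro l
  induction l with
  | nil => intro m hm; simpa using hm
  | cons j l ih =>
    intro m hm
    apply ih
    unfold pvF
    split_ifs with h
    · omega
    · exact hm

theorem pvFold_zero (stock : List Int) (l : List Nat) : l.foldl (pvF stock 0) 0 = 0 := by
  induction l with
  | nil => rfl
  | cons j l ih => simpa [pvF, pvWin] using ih

-- ===== VERDICT (by name: the statement is the Claim_ definition above) =====
theorem cumulative_observable_sum_spec : Claim_equal_cumulative_observable_sum := by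
  unfold Claim_equal_cumulative_observable_sum
  intro stock k _ hpre
  unfold Pre_cumulative_observable_sum at hpre
  unfold Spec_cumulative_observable_sum
  by_cases hk0 : k < 1
  · -- k = 0: no positive-size window, both sides give -1
    have hk : k = 0 := by omega
    subst hk
    rw [pvA_eq _ _ le_rfl]
    rw [show (0 : Int).toNat = 0 from rfl, pvFold_zero]
    unfold cumulative_observable_sum_alt
    simp
  · by_cases hkn : (stock.length : Int) < k
    · -- k larger than the list: A's range is empty, B's guard fires
      unfold cumulative_observable_sum cumulative_observable_sum_alt
      rw [PySem.List.pyRange_one_eq_nil (by omega)]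
      simp [hkn]
    · -- main case 1 ≤ k ≤ len(stock)
      have h1 : 1 ≤ k := by omega
      have h2 : k ≤ (stock.length : Int) := by omega
      obtain ⟨d, hfold, _⟩ := pvB_inv stock k h1 h2 stock.length le_rfl
      rw [pvA_eq _ _ (by omega)]
      unfold cumulative_observable_sum_alt
      dsimp only
      rw [if_neg (show ¬(k < 1 ∨ (stock.length : Int) < k) by omega)]
      rw [hfold]
      dsimp only
      have hidx : ((stock.length : Int) - k + 1).toNat = stock.length + 1 - k.toNat := by omega
      rw [hidx]
      have hnn : 0 ≤ (List.range (stock.length + 1 - k.toNat)).foldl (pvF stock k.toNat) 0 :=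
    pvFold_nonneg _ _ _ _ le_rfl
      by_cases h0 : (List.range (stock.length + 1 - k.toNat)).foldl (pvF stock k.toNat) 0 = 0
      · simp [h0]
      · rw [if_neg h0, if_pos (by omega)]
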